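-- pv_equiv track=rewrite | github.com/hynky1999/Bakalarka-code | Modelling/utils/dataset.py | get_gender
-- ===== SOURCE A (Python) =====
-- from typing import Any, Callable, List
--
-- MAN = 0
--
-- WOMAN = 1
--
-- MIXED = 2
--
-- def get_gender(genders: List[int] | None):
--     if genders is None:
--         return None
--
--     if all(gender == 0 for gender in genders):
--         return MAN
--     elif all(gender == WOMAN for gender in genders):
--         return WOMAN
--     return MIXED
-- ===== SOURCE B (Python) =====
-- MAN = 0
-- WOMAN = 1
-- MIXED = 2
--
-- def get_gender(genders):
--     # Uniformity check against a representative: one early-exit pass, no all() scans.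
--     if genders is None:
--         return None
--     it = iter(genders)
--     first = next(it, MAN)
--     for g in it:
--         if g != first:
--             return MIXED
--     return first if first in (MAN, WOMAN) else MIXED
-- ===== Notes on version B (the rewrite author's own statement) =====
-- stated objective: alternative
-- what changed: instead of two staged all()-scans (all zero, then all one), B does one early-exit pass checking uniformity against the first element as representative and then classifies that single representative (0->MAN, 1->WOMAN, anything else or non-uniform ->MIXED)
import Mathlib
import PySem

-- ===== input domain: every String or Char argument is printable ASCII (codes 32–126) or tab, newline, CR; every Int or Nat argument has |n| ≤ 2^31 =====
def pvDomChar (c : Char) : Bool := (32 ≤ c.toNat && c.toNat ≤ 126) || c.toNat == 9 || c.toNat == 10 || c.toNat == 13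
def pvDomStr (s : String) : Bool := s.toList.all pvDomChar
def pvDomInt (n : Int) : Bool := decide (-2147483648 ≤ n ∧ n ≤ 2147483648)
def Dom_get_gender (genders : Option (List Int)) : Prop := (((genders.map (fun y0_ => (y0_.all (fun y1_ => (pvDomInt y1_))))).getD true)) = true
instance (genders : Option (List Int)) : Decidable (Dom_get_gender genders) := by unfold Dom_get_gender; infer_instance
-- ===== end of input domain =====

-- B replaces A's two staged all()-scans with one early-exit uniformity pass against the
-- first element as representative; objective: alternative decomposition, same cost.


-- ===== PORT A =====
-- Port of A: two all()-scans in the Python order.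
def get_gender (genders : Option (List Int)) : Option Int :=
  match genders with
  | none => none
  | some gs =>
    if gs.all (fun gender => gender == 0) then some 0
    else if gs.all (fun gender => gender == 1) then some 1
    else some 2

-- ===== PORT B =====
-- Port of B's for-loop: early-exit scan over the rest; at the end classify the representative.
def ggLoop (first : Int) : List Int → Int
  | [] => if first == 0 || first == 1 then first else 2
  | g :: rest => if g != first then 2 else ggLoop first rest

def get_gender_alt (genders : Option (List Int)) : Option Int :=
  match genders with
  | none => none
  | some [] => some (ggLoop 0 [])          -- next(it, MAN) on an empty iterator
  | some (g :: rest) => some (ggLoop g rest)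

-- ===== PRECONDITION & SPEC =====
def Spec_get_gender (genders : Option (List Int)) (out : Option Int) : Prop := out = get_gender_alt genders
instance (genders : Option (List Int)) (out : Option Int) : Decidable (Spec_get_gender genders out) := by unfold Spec_get_gender; infer_instance

-- ===== CLAIM (what is proved, stated in full; the proofs are below) =====
def Claim_equal_get_gender : Prop := ∀ (genders : Option (List Int)), Dom_get_gender genders → Spec_get_gender genders (get_gender genders)

-- ===== LEMMAS AND PROOFS =====
theorem ggLoop_eq (first : Int) (rest : List Int) :
    ggLoop first rest =
      if rest.all (fun g => g == first)
      then (if first == 0 || first == 1 then first else 2) else 2 := by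
  induction rest with
  | nil => simp [ggLoop]
  | cons g rest ih =>
    by_cases h : g = first
    · simp [ggLoop, h, ih]
    · simp [ggLoop, h, bne_iff_ne, Ne, fun hh => h hh]

-- ===== VERDICT (by name: the statement is the Claim_ definition above) =====
theorem get_gender_spec : Claim_equal_get_gender := by
  intro genders _
  unfold Spec_get_gender get_gender get_gender_alt
  match genders with
  | none => rfl
  | some [] => simp [ggLoop]
  | some (g :: rest) =>
    show (if (g :: rest).all (fun gender => gender == (0:Int)) then some (0:Int)
          else if (g :: rest).all (fun gender => gender == (1:Int)) then some 1 else some 2)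
         = some (ggLoop g rest)
    by_cases hu : ∀ x ∈ rest, x = g
    · have hall : rest.all (fun x => x == g) = true := by
        simp [List.all_eq_true]; exact hu
      rw [ggLoop_eq, hall]
      by_cases h0 : g = 0
      · subst h0
        have : (0 :: rest).all (fun gender => gender == (0:Int)) = true := by
          simp [List.all_eq_true]; exact hu
        simp [this]
      · by_cases h1 : g = 1
        · subst h1
          have hA1 : (1 :: rest).all (fun gender => gender == (1:Int)) = true := by
            simp [List.all_eq_true]; exact hu
          simp [hA1]
        · have hA0 : (g :: rest).all (fun gender => gender == (0:Int)) = false := by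
            simp [h0]
          have hA1 : (g :: rest).all (fun gender => gender == (1:Int)) = false := by
            simp [h1]
          simp [hA0, hA1, h0, h1]
    · push_neg at hu
      obtain ⟨x, hx, hxg⟩ := hu
      have hall : rest.all (fun y => y == g) = false := by
        simp [List.all_eq_false]; exact ⟨x, hx, hxg⟩
      rw [ggLoop_eq, hall]
      have hA0 : (g :: rest).all (fun gender => gender == (0:Int)) = false := by
        by_cases h0 : g = 0
        · subst h0
          simp [List.all_eq_false]; exact ⟨x, hx, hxg⟩
        · simp [h0]
      have hA1 : (g :: rest).all (fun gender => gender == (1:Int)) = false := by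
        by_cases h1 : g = 1
        · subst h1
          simp [List.all_eq_false]; exact ⟨x, hx, hxg⟩
        · simp [h1]
      simp [hA0, hA1]
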